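-- pv_equiv track=rewrite | github.com/NLGithubWP/TRAILS-Database-Native-Model-Selection | main/statistic_lib/__init__.py | get_rank_after_sort
-- ===== SOURCE A (Python) =====
-- def get_rank_after_sort(a: list):
--     """
--     Get rank after sorting, [3,1,2] => [2,0,1]
--     :param a:
--     :return:
--     """
--     mapper = {}
--     asort = sorted(a)
--     for i, ele in enumerate(asort):
--         mapper[ele] = i
--     res = []
--
--     for ele in a:
--         res.append(mapper[ele])
--     return res
-- ===== SOURCE B (Python) =====
-- def get_rank_after_sort(a: list):
--     # sort once, then find each element's rank by binary search (rightmost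
--     # insertion point minus one) -- no value->index dict is built
--     asort = sorted(a)
--     res = []
--     for x in a:
--         lo, hi = 0, len(asort)
--         while lo < hi:
--             mid = (lo + hi) // 2
--             if asort[mid] <= x:
--                 lo = mid + 1
--             else:
--                 hi = mid
--         res.append(lo - 1)
--     return res
-- ===== Notes on version B (the rewrite author's own statement) =====
-- stated objective: alternative
-- what changed: B drops A's value-to-last-index dict entirely: it sorts once and finds each element's rank by a hand-written binary search (rightmost insertion point minus one) over the sorted copy, so no mapping structure is built.
import Mathlib
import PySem

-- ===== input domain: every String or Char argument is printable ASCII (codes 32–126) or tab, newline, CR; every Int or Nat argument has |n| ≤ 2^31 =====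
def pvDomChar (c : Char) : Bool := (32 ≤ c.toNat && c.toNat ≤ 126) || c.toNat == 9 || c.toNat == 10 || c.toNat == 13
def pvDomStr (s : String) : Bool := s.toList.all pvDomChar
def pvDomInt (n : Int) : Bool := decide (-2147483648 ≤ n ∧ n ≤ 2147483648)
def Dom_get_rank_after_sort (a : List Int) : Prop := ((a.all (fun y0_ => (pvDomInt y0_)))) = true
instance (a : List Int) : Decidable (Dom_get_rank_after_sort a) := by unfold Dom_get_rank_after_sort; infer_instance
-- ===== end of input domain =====

-- B replaces A's value→last-index dict by a per-element binary search over the sorted copy.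

-- ===== PORT A =====
-- mapper[ele] never misses (ele ∈ a ⊆ sorted a), so the KeyError branch is unreachable;
-- the lookup is ported as get? with a defaulted (never used) 0.
def get_rank_after_sort (a : List Int) : List Int :=
  let asort := PySem.List.sorted a (fun x => x) false
  let mapper := (PySem.List.enumerate asort 0).foldl
      (fun d (p : Int × Int) => d.insert p.2 p.1) (PySem.Dict.empty)
  a.foldl (fun res ele => res ++ [(mapper.get? ele).getD 0]) []

-- ===== PORT B =====
-- the 'while lo < hi' binary search of Source B; asort[mid] has 0 ≤ lo ≤ mid < hi ≤ len,
-- so the pyGetD default 0 is never used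
def bisectLoop (s : List Int) (x : Int) (lo hi : Int) : Int :=
  if _h : lo < hi then
    let mid := PySem.Int.floordiv (lo + hi) 2
    if PySem.List.pyGetD s mid 0 ≤ x then bisectLoop s x (mid + 1) hi
    else bisectLoop s x lo mid
  else lo
termination_by (hi - lo).toNat
decreasing_by
  · have hb := PySem.Int.floordiv_two_mid_bounds (le_of_lt _h)
    omega
  · have hlt : PySem.Int.floordiv (lo + hi) 2 < hi := by
      rw [PySem.Int.floordiv_lt_iff_lt_mul (by omega : (0:Int) < 2)]
      omega
    omega

def get_rank_after_sort_alt (a : List Int) : List Int :=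
  let asort := PySem.List.sorted a (fun x => x) false
  a.foldl (fun res x => res ++ [bisectLoop asort x 0 (asort.length : Int) - 1]) []

-- ===== PRECONDITION & SPEC =====
def Spec_get_rank_after_sort (a : List Int) (out : List Int) : Prop := out = get_rank_after_sort_alt a
instance (a : List Int) (out : List Int) : Decidable (Spec_get_rank_after_sort a out) := by unfold Spec_get_rank_after_sort; infer_instance

-- ===== CLAIM (what is proved, stated in full; the proofs are below) =====
def Claim_equal_get_rank_after_sort : Prop := ∀ (a : List Int), Dom_get_rank_after_sort a → Spec_get_rank_after_sort a (get_rank_after_sort a)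

-- ===== LEMMAS AND PROOFS =====

-- The dict built by 'for i, ele in enumerate(asort): mapper[ele] = i' over a non-decreasing list:
-- looking up x ∈ asort yields its LAST index, which is (#elements ≤ x) - 1 (shifted by the start k).
lemma get?_foldl_enumerate_insert (s : List Int) (hs : s.Pairwise (· ≤ ·)) (x : Int) :
    ∀ (k : Int) (d : PySem.Dict Int Int),
      ((PySem.List.enumerate s k).foldl (fun d (p : Int × Int) => d.insert p.2 p.1) d).get? x
        = if x ∈ s then some (k + (s.countP (fun y => decide (y ≤ x)) : Int) - 1)
          else d.get? x := by
  induction s with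
  | nil => intro k d; simp [PySem.List.enumerate]
  | cons y t ih =>
    intro k d
    rw [List.pairwise_cons] at hs
    rw [PySem.List.enumerate_cons]
    simp only [List.foldl_cons]
    rw [ih hs.2 (k + 1) (d.insert y k)]
    by_cases hxt : x ∈ t
    · have hyx : y ≤ x := hs.1 x hxt
      simp [hxt, hyx]
      ring
    · by_cases hxy : x = y
      · subst hxy
        have hc : t.countP (fun y => decide (y ≤ x)) = 0 := by
          rw [List.countP_eq_zero]
          intro z hz
          simp only [decide_eq_true_eq]
          intro hzx
          exact hxt (by have := le_antisymm hzx (hs.1 z hz); rwa [this] at hz)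
        simp [hxt, hc, PySem.Dict.get?_insert_self]
      · simp [hxt, hxy, PySem.Dict.get?_insert_of_ne d k (fun h => hxy h)]

-- sortedness as an index fact
lemma sorted_getElem_le (s : List Int) (hs : s.Pairwise (· ≤ ·))
    {i j : Nat} (hij : i ≤ j) (hj : j < s.length) : s[i]'(by omega) ≤ s[j] := by
  rcases Nat.eq_or_lt_of_le hij with h | h
  · subst h; rfl
  · exact List.pairwise_iff_getElem.mp hs i j (by omega) hj h

-- the binary search over a non-decreasing list counts the elements ≤ x in s[lo:hi]
lemma bisectLoop_eq (s : List Int) (hs : s.Pairwise (· ≤ ·)) (x : Int) :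
    ∀ (n : Nat) (lo hi : Int), (hi - lo).toNat = n → 0 ≤ lo → lo ≤ hi → hi ≤ s.length →
      bisectLoop s x lo hi
        = lo + (((s.drop lo.toNat).take (hi - lo).toNat).countP (fun y => decide (y ≤ x)) : Int) := by
  intro n
  induction n using Nat.strong_induction_on with
  | _ n ih =>
    intro lo hi hn h0 hlh hhl
    rw [bisectLoop]
    by_cases h : lo < hi
    · simp only [h, dif_pos]
      have hb := PySem.Int.floordiv_two_mid_bounds (le_of_lt h)
      have hmidlt : PySem.Int.floordiv (lo + hi) 2 < hi := by
        rw [PySem.Int.floordiv_lt_iff_lt_mul (by omega : (0:Int) < 2)]; omega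
      generalize hmid : PySem.Int.floordiv (lo + hi) 2 = mid at hb hmidlt ⊢
      have hmlen : mid.toNat < s.length := by omega
      have hget : PySem.List.pyGetD s mid 0 = s[mid.toNat] := by
        rw [PySem.List.pyGetD_of_nonneg s 0 (by omega : (0:Int) ≤ mid)]
        simp [List.getElem?_eq_getElem hmlen]
      -- split s[lo:hi] at mid+1-lo resp. mid-lo
      have hc1 : (mid + 1).toNat = mid.toNat + 1 := by omega
      have hc2 : (mid - lo).toNat = mid.toNat - lo.toNat := by omega
      by_cases hle : PySem.List.pyGetD s mid 0 ≤ x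
      · simp only [hle, if_pos]
        have hm1 : (hi - (mid + 1)).toNat < n := by omega
        rw [ih ((hi - (mid+1)).toNat) hm1 (mid+1) hi rfl (by omega) (by omega) hhl, hc1]
        have hsplit : (s.drop lo.toNat).take (hi - lo).toNat
            = (s.drop lo.toNat).take (mid.toNat + 1 - lo.toNat)
              ++ (s.drop (mid.toNat + 1)).take (hi - (mid+1)).toNat := by
          rw [show (hi - lo).toNat = (mid.toNat + 1 - lo.toNat) + (hi - (mid+1)).toNat by omega,
              List.take_add, List.drop_drop]
          congr 3
          omega
        rw [hsplit, List.countP_append]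
        have hall : ((s.drop lo.toNat).take (mid.toNat + 1 - lo.toNat)).countP
            (fun y => decide (y ≤ x)) = mid.toNat + 1 - lo.toNat := by
          have hlen : ((s.drop lo.toNat).take (mid.toNat + 1 - lo.toNat)).length
              = mid.toNat + 1 - lo.toNat := by
            simp [List.length_take, List.length_drop]; omega
          refine Eq.trans (List.countP_eq_length.mpr ?_) hlen
          intro y hy
          obtain ⟨i, hi2, hyi⟩ := List.mem_iff_getElem.mp hy
          have hi3 : i < mid.toNat + 1 - lo.toNat := by rw [hlen] at hi2; omega
          rw [List.getElem_take, List.getElem_drop] at hyi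
          subst hyi
          simp only [decide_eq_true_eq]
          calc s[lo.toNat + i] ≤ s[mid.toNat] :=
                sorted_getElem_le s hs (by omega) hmlen
            _ ≤ x := by rwa [hget] at hle
        rw [hall]
        push_cast
        omega
      · simp only [hle, if_false]
        have hm2 : (mid - lo).toNat < n := by omega
        rw [ih ((mid - lo).toNat) hm2 lo mid rfl h0 (by omega) (by omega), hc2]
        have hsplit : (s.drop lo.toNat).take (hi - lo).toNat
            = (s.drop lo.toNat).take (mid.toNat - lo.toNat)
              ++ (s.drop mid.toNat).take (hi - mid).toNat := by
          rw [show (hi - lo).toNat = (mid.toNat - lo.toNat) + (hi - mid).toNat by omega,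
              List.take_add, List.drop_drop]
          congr 3
          omega
        rw [hsplit, List.countP_append]
        have hnone : ((s.drop mid.toNat).take (hi - mid).toNat).countP
            (fun y => decide (y ≤ x)) = 0 := by
          rw [List.countP_eq_zero]
          intro y hy
          obtain ⟨i, hi2, hyi⟩ := List.mem_iff_getElem.mp hy
          have hi3 : mid.toNat + i < s.length := by
            simp [List.length_take, List.length_drop] at hi2; omega
          rw [List.getElem_take, List.getElem_drop] at hyi
          subst hyi
          simp only [decide_eq_true_eq]
          intro hcon
          exact hle (by
            rw [hget]
            exact le_trans (sorted_getElem_le s hs (Nat.le_add_right _ _) hi3) hcon)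
        rw [hnone]
        push_cast
        omega
    · have h0' : (hi - lo).toNat = 0 := by omega
      simp [h, h0']

-- ===== VERDICT (by name: the statement is the Claim_ definition above) =====
theorem get_rank_after_sort_spec : Claim_equal_get_rank_after_sort := by
  intro a _
  unfold Spec_get_rank_after_sort get_rank_after_sort get_rank_after_sort_alt
  rw [PySem.List.foldl_append_singleton_eq_map, PySem.List.foldl_append_singleton_eq_map]
  apply List.map_congr_left
  intro x hx
  have hpw := PySem.List.sorted_pairwise a (fun x => x)
  have hmem : x ∈ PySem.List.sorted a (fun x => x) false := by
    rw [PySem.List.mem_sorted]; exact hx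
  rw [get?_foldl_enumerate_insert _ hpw x 0 PySem.Dict.empty]
  simp only [hmem, if_pos, Option.getD_some]
  rw [bisectLoop_eq _ hpw x _ 0 _ rfl le_rfl (by positivity) le_rfl]
  have hlen : ((((PySem.List.sorted a (fun x => x) false).length : Int) - 0).toNat)
      = (PySem.List.sorted a (fun x => x) false).length := by omega
  simp only [Int.toNat_zero, List.drop_zero, hlen, List.take_length]
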